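-- pv_equiv track=rewrite | github.com/gcomneno/oeis-probe | src/oeis_probe/core.py | best_subsequence_match
-- ===== SOURCE A (Python) =====
-- from typing import Iterator, List, Optional, Sequence, Tuple
--
-- def best_subsequence_match(hay: Sequence[int], needle: Sequence[int]) -> Tuple[int, Optional[int]]:
--     """
--     Find best consecutive match length of needle inside hay.
--     Returns (match_len, match_at_index_in_hay).
--     """
--     if not needle or not hay:
--         return 0, None
--     best_len = 0
--     best_at: Optional[int] = None
--     n = len(needle)
--     for start in range(len(hay)):
--         if len(hay) - start <= best_len:
--             break
--         k = 0
--         while start + k < len(hay) and k < n and hay[start + k] == needle[k]: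
--             k += 1
--         if k > best_len:
--             best_len = k
--             best_at = start
--         if best_len == n:
--             break
--     return best_len, best_at
-- ===== SOURCE B (Python) =====
-- from typing import Optional, Sequence, Tuple
--
-- def best_subsequence_match(hay: Sequence[int], needle: Sequence[int]) -> Tuple[int, Optional[int]]:
--     """Binary search on the match length: a needle-prefix of length k occurs in hay
--     iff one of length k-1 does, so the best length is found with O(log n) occurrence
--     scans instead of extending a match at every start."""
--     def occ(k: int) -> Optional[int]:
--         # first index i with hay[i:i+k] == needle[:k], or None
--         p = needle[:k]
--         for i in range(len(hay) - k + 1):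
--             if hay[i:i + k] == p:
--                 return i
--         return None
--
--     lo, hi = 0, min(len(needle), len(hay))
--     while lo < hi:
--         mid = (lo + hi + 1) // 2
--         if occ(mid) is not None:
--             lo = mid
--         else:
--             hi = mid - 1
--     if lo == 0:
--         return 0, None
--     return lo, occ(lo)
-- ===== Notes on version B (the rewrite author's own statement) =====
-- stated objective: alternative
-- what changed: Instead of extending a match at every start position with early-exit breaks, B binary-searches the answer length k (occurrence of a needle-prefix of length k is monotone in k) and then takes the first occurrence index of that longest prefix.
import Mathlib
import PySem

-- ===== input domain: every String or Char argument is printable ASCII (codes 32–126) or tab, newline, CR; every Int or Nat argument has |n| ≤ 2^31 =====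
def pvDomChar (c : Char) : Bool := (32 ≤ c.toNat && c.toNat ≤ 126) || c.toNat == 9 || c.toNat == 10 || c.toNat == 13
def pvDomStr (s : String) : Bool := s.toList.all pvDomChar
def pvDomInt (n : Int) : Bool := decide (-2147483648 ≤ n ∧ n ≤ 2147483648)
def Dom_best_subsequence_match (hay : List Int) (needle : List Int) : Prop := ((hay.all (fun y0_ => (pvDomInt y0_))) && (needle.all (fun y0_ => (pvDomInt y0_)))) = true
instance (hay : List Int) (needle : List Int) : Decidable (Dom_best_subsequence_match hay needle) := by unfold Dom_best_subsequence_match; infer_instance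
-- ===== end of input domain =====

-- B replaces A's per-start match extension by a binary search on the answer length
-- (alternative algorithm, same exact return value; no speed claim).

-- ===== PORT A =====

-- inner `while start + k < len(hay) and k < n and hay[start+k] == needle[k]: k += 1`
-- (fuel = hay.length + 1 is a pure totality guard: the guard `start + k < len(hay)` always fails first)
def pvKloop (hay needle : List Int) (start : Nat) : Nat → Nat → Nat
  | k, 0 => k
  | k, fuel + 1 =>
    if start + k < hay.length ∧ k < needle.length ∧ hay[start + k]! = needle[k]! then
      pvKloop hay needle start (k + 1) fuel
    else k

-- the `for start in range(len(hay))` loop with its two breaks (fuel is again only a totality guard)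
def pvLoopA (hay needle : List Int) : Nat → Nat → Int → Option Int → Int × Option Int
  | 0, _, best_len, best_at => (best_len, best_at)
  | fuel + 1, start, best_len, best_at =>
    if start < hay.length then
      if (hay.length : Int) - (start : Int) ≤ best_len then (best_len, best_at)
      else
        let k := pvKloop hay needle start 0 (hay.length + 1)
        let bl : Int := if best_len < (k : Int) then (k : Int) else best_len
        let ba : Option Int := if best_len < (k : Int) then some (start : Int) else best_at
        if bl = (needle.length : Int) then (bl, ba)
        else pvLoopA hay needle fuel (start + 1) bl ba
    else (best_len, best_at)

def best_subsequence_match (hay : List Int) (needle : List Int) : Int × Option Int :=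
  if needle = [] ∨ hay = [] then (0, none)
  else pvLoopA hay needle (hay.length + 1) 0 0 none

-- ===== PORT B =====

-- `for i in range(len(hay) - k + 1): if hay[i:i+k] == p: return i` / `return None`
-- (fuel = hay.length + 1 is a pure totality guard: the range bound always stops the loop first)
def pvOccLoop (hay p : List Int) (k : Nat) : Nat → Nat → Option Int
  | 0, _ => none
  | fuel + 1, i =>
    if (i : Int) < (hay.length : Int) - (k : Int) + 1 then
      if PySem.List.slice hay (some (i : Int)) (some ((i : Int) + (k : Int))) = p then some (i : Int)
      else pvOccLoop hay p k fuel (i + 1)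
    else none

-- `occ(k)`: first index of needle[:k] in hay, or None
def pvOcc (hay needle : List Int) (k : Nat) : Option Int :=
  pvOccLoop hay (PySem.List.slice needle none (some (k : Int))) k (hay.length + 1) 0

-- `while lo < hi: mid = (lo+hi+1)//2; …` (fuel only a totality guard; hi - lo shrinks each pass)
def pvBsearch (hay needle : List Int) : Nat → Nat → Nat → Nat
  | 0, lo, _ => lo
  | fuel + 1, lo, hi =>
    if lo < hi then
      let mid := (lo + hi + 1) / 2
      if (pvOcc hay needle mid).isSome then pvBsearch hay needle fuel mid hi
      else pvBsearch hay needle fuel lo (mid - 1)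
    else lo

def best_subsequence_match_alt (hay : List Int) (needle : List Int) : Int × Option Int :=
  let lo := pvBsearch hay needle (min needle.length hay.length + 1) 0 (min needle.length hay.length)
  if lo = 0 then (0, none)
  else ((lo : Int), pvOcc hay needle lo)

-- ===== PRECONDITION & SPEC =====
def Spec_best_subsequence_match (hay : List Int) (needle : List Int) (out : Int × Option Int) : Prop := out = best_subsequence_match_alt hay needle
instance (hay : List Int) (needle : List Int) (out : Int × Option Int) : Decidable (Spec_best_subsequence_match hay needle out) := by unfold Spec_best_subsequence_match; infer_instance

-- ===== CLAIM (what is proved, stated in full; the proofs are below) =====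
def Claim_equal_best_subsequence_match : Prop := ∀ (hay : List Int) (needle : List Int), Dom_best_subsequence_match hay needle → Spec_best_subsequence_match hay needle (best_subsequence_match hay needle)

-- ===== LEMMAS AND PROOFS =====

-- longest common prefix length
def pvLcp : List Int → List Int → Nat
  | a :: as, b :: bs => if a = b then pvLcp as bs + 1 else 0
  | _, _ => 0

-- (max over suffixes of lcp with needle, first index attaining it — none if the max is 0)
def pvMB : List Int → List Int → Nat × Option Nat
  | [], _ => (0, none)
  | h :: t, nd =>
    let r := pvMB t nd
    let k := pvLcp (h :: t) nd
    if r.1 ≤ k ∧ 0 < k then (k, some 0) else (r.1, r.2.map (· + 1))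

theorem pvLcp_nil_right (xs : List Int) : pvLcp xs [] = 0 := by
  cases xs <;> rfl

theorem pvLcp_le_left (xs ys : List Int) : pvLcp xs ys ≤ xs.length := by
  induction xs generalizing ys with
  | nil => simp [pvLcp]
  | cons a as ih =>
    cases ys with
    | nil => simp [pvLcp]
    | cons b bs => simp only [pvLcp]; split <;> simp_all

theorem pvLcp_le_right (xs ys : List Int) : pvLcp xs ys ≤ ys.length := by
  induction xs generalizing ys with
  | nil => simp [pvLcp]
  | cons a as ih =>
    cases ys with
    | nil => simp [pvLcp]
    | cons b bs => simp only [pvLcp]; split <;> simp_all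

theorem pvLcp_take_iff (xs ys : List Int) (k : Nat) :
    k ≤ pvLcp xs ys ↔ xs.take k = ys.take k ∧ k ≤ xs.length ∧ k ≤ ys.length := by
  induction xs generalizing ys k with
  | nil =>
    cases k <;> simp [pvLcp]
  | cons a as ih =>
    cases ys with
    | nil => cases k <;> simp [pvLcp]
    | cons b bs =>
      cases k with
      | zero => simp
      | succ k' =>
        simp only [pvLcp]
        split
        · next hab =>
          subst hab
          simpa [Nat.succ_le_succ_iff] using ih bs k'
        · next hab =>
          simp only [List.take_succ_cons]
          constructor
          · omega
          · rintro ⟨h1, -, -⟩; exact absurd (List.cons.injEq .. ▸ h1).1 hab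

theorem pvMB_fst_cons (h : Int) (t nd : List Int) :
    (pvMB (h :: t) nd).1 = max (pvLcp (h :: t) nd) (pvMB t nd).1 := by
  simp only [pvMB]; split <;> simp <;> omega

theorem pvMB_snd_cons (h : Int) (t nd : List Int) :
    (pvMB (h :: t) nd).2 =
      if (pvMB t nd).1 ≤ pvLcp (h :: t) nd ∧ 0 < pvLcp (h :: t) nd then some 0
      else (pvMB t nd).2.map (· + 1) := by
  simp only [pvMB]; split <;> rfl

theorem pvMB_fst_cons' (h : Int) (t nd : List Int) :
    (pvMB (h :: t) nd).1 =
      if (pvMB t nd).1 ≤ pvLcp (h :: t) nd ∧ 0 < pvLcp (h :: t) nd then pvLcp (h :: t) nd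
      else (pvMB t nd).1 := by
  simp only [pvMB]; split <;> rfl

theorem pvMB_fst_le_len (xs nd : List Int) : (pvMB xs nd).1 ≤ xs.length := by
  induction xs with
  | nil => simp [pvMB]
  | cons h t ih =>
    rw [pvMB_fst_cons]
    have := pvLcp_le_left (h :: t) nd
    exact max_le this (le_trans ih (by simp))

theorem pvMB_fst_le_right (xs nd : List Int) : (pvMB xs nd).1 ≤ nd.length := by
  induction xs with
  | nil => simp [pvMB]
  | cons h t ih =>
    rw [pvMB_fst_cons]
    have := pvLcp_le_right (h :: t) nd
    exact max_le this ih

theorem pvMB_le (xs nd : List Int) (i : Nat) : pvLcp (xs.drop i) nd ≤ (pvMB xs nd).1 := by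
  induction xs generalizing i with
  | nil => simp [pvLcp, pvMB]
  | cons h t ih =>
    rw [pvMB_fst_cons]
    cases i with
    | zero => simp
    | succ i' => simpa using le_trans (ih i') (le_max_right _ _)

theorem pvMB_snd_none (xs nd : List Int) (h : (pvMB xs nd).2 = none) : (pvMB xs nd).1 = 0 := by
  induction xs with
  | nil => simp [pvMB]
  | cons a t ih =>
    rw [pvMB_snd_cons] at h
    rw [pvMB_fst_cons]
    split at h
    · simp at h
    · next hc =>
      simp only [Option.map_eq_none_iff] at h
      have := ih h
      omega

theorem pvMB_snd_some (xs nd : List Int) (i : Nat) (h : (pvMB xs nd).2 = some i) :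
    pvLcp (xs.drop i) nd = (pvMB xs nd).1 ∧ 0 < (pvMB xs nd).1 ∧
      ∀ j, j < i → pvLcp (xs.drop j) nd < (pvMB xs nd).1 := by
  induction xs generalizing i with
  | nil => simp [pvMB] at h
  | cons a t ih =>
    rw [pvMB_snd_cons] at h
    rw [pvMB_fst_cons']
    by_cases hc : (pvMB t nd).1 ≤ pvLcp (a :: t) nd ∧ 0 < pvLcp (a :: t) nd
    · rw [if_pos hc] at h
      injection h with h; subst h
      rw [if_pos hc]
      exact ⟨rfl, hc.2, by omega⟩
    · rw [if_neg hc] at h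
      rw [if_neg hc]
      rw [Option.map_eq_some_iff] at h
      obtain ⟨i', hi', rfl⟩ := h
      obtain ⟨h1, h2, h3⟩ := ih i' hi'
      refine ⟨by simpa using h1, h2, ?_⟩
      intro j hj
      cases j with
      | zero => simp only [List.drop_zero]; omega
      | succ j' => simpa using h3 j' (by omega)

theorem pvMB_pos_some (xs nd : List Int) (h : 0 < (pvMB xs nd).1) : ∃ i, (pvMB xs nd).2 = some i := by
  cases hm : (pvMB xs nd).2 with
  | none => exact absurd (pvMB_snd_none xs nd hm) (by omega)
  | some i => exact ⟨i, rfl⟩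

-- the inner while loop computes the lcp of the suffixes
theorem pvLcp_nil_left (ys : List Int) : pvLcp [] ys = 0 := by
  cases ys <;> rfl

theorem pvKloop_eq (hay needle : List Int) (start : Nat) :
    ∀ fuel k, hay.length ≤ start + k + fuel →
      pvKloop hay needle start k fuel = k + pvLcp (hay.drop (start + k)) (needle.drop k) := by
  intro fuel
  induction fuel with
  | zero =>
    intro k hk
    rw [List.drop_eq_nil_of_le (by omega : hay.length ≤ start + k)]
    simp [pvKloop, pvLcp_nil_left]
  | succ fuel ih =>
    intro k hk
    simp only [pvKloop]
    split
    · next h =>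
      obtain ⟨h1, h2, h3⟩ := h
      rw [ih (k + 1) (by omega)]
      rw [List.drop_eq_getElem_cons h1, List.drop_eq_getElem_cons h2]
      rw [getElem!_pos hay (start + k) h1, getElem!_pos needle k h2] at h3
      simp only [pvLcp, if_pos h3]
      have : start + (k + 1) = start + k + 1 := by omega
      rw [this]
      omega
    · next h =>
      by_cases hl : start + k < hay.length
      · by_cases hn : k < needle.length
        · have hne : ¬ hay[start + k]! = needle[k]! := fun he => h ⟨hl, hn, he⟩
          rw [getElem!_pos hay (start + k) hl, getElem!_pos needle k hn] at hne
          rw [List.drop_eq_getElem_cons hl, List.drop_eq_getElem_cons hn]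
          simp [pvLcp, if_neg hne]
        · rw [List.drop_eq_nil_of_le (by omega : needle.length ≤ k)]
          simp [pvLcp_nil_right]
      · rw [List.drop_eq_nil_of_le (by omega : hay.length ≤ start + k)]
        simp [pvLcp_nil_left]

-- A's outer loop, with both breaks, computes pvMB of the remaining suffix
theorem pvLoopA_eq (hay needle : List Int) :
    ∀ fuel (start : Nat) (b : Nat) (ba : Option Int), hay.length ≤ start + fuel →
      pvLoopA hay needle fuel start (b : Int) ba =
        (if b < (pvMB (hay.drop start) needle).1
          then (((pvMB (hay.drop start) needle).1 : Int),
                ((pvMB (hay.drop start) needle).2.map (fun i => ((start + i : Nat) : Int))))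
          else ((b : Int), ba)) := by
  intro fuel
  induction fuel with
  | zero =>
    intro start b ba hm
    rw [List.drop_eq_nil_of_le (by omega : hay.length ≤ start)]
    simp [pvLoopA, pvMB]
  | succ fuel ih =>
    intro start b ba hm
    by_cases hs : start < hay.length
    · have hcons : hay.drop start = hay[start] :: hay.drop (start + 1) :=
        List.drop_eq_getElem_cons hs
      have hfst : (pvMB (hay.drop start) needle).1 =
          max (pvLcp (hay.drop start) needle) (pvMB (hay.drop (start + 1)) needle).1 := by
        rw [hcons, pvMB_fst_cons, ← hcons]
      have hsnd : (pvMB (hay.drop start) needle).2 =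
          (if (pvMB (hay.drop (start + 1)) needle).1 ≤ pvLcp (hay.drop start) needle ∧
              0 < pvLcp (hay.drop start) needle
            then some 0
            else (pvMB (hay.drop (start + 1)) needle).2.map (· + 1)) := by
        rw [hcons, pvMB_snd_cons, ← hcons]
      have hK : pvKloop hay needle start 0 (hay.length + 1) = pvLcp (hay.drop start) needle := by
        simpa using pvKloop_eq hay needle start (hay.length + 1) 0 (by omega)
      set K := pvLcp (hay.drop start) needle with hKdef
      set tb1 := (pvMB (hay.drop (start + 1)) needle).1 with htb1
      set tb2 := (pvMB (hay.drop (start + 1)) needle).2 with htb2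
      have hKlen : K ≤ needle.length := pvLcp_le_right _ _
      have htb1n : tb1 ≤ needle.length := pvMB_fst_le_right _ _
      have hMlen : (pvMB (hay.drop start) needle).1 ≤ hay.length - start := by
        have := pvMB_fst_le_len (hay.drop start) needle
        simpa using this
      simp only [pvLoopA]
      rw [if_pos hs]
      by_cases hb1 : (hay.length : Int) - (start : Int) ≤ (b : Int)
      · rw [if_pos hb1, if_neg (by omega)]
      · rw [if_neg hb1]
        simp only [hK, Nat.cast_lt]
        by_cases hbk : b < K
        · simp only [if_pos hbk, Nat.cast_inj]
          by_cases hKn : K = needle.length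
          · rw [if_pos hKn, hfst, hsnd]
            rw [if_pos (by omega), if_pos (by omega)]
            have hmax : max K tb1 = K := by omega
            rw [hmax]
            simp
          · rw [if_neg hKn]
            rw [ih (start + 1) K (some start) (by omega)]
            rw [hfst, hsnd, ← htb1, ← htb2]
            by_cases hKt : K < tb1
            · rw [if_pos hKt, if_pos (by omega), if_neg (by omega)]
              have hmax : max K tb1 = tb1 := by omega
              rw [hmax]
              cases tb2 with
              | none => simp
              | some v => simp; omega
            · rw [if_neg hKt, if_pos (by omega), if_pos (by omega)]
              have hmax : max K tb1 = K := by omega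
              rw [hmax]
              simp
        · simp only [if_neg hbk, Nat.cast_inj]
          by_cases hbn : b = needle.length
          · rw [if_pos hbn, hfst, hsnd]
            rw [if_neg (by omega)]
          · rw [if_neg hbn]
            rw [ih (start + 1) b ba (by omega)]
            rw [hfst, hsnd, ← htb1, ← htb2]
            by_cases hbt : b < tb1
            · rw [if_pos hbt, if_pos (by omega), if_neg (by omega)]
              have hmax : max K tb1 = tb1 := by omega
              rw [hmax]
              cases tb2 with
              | none => simp
              | some v => simp; omega
            · rw [if_neg hbt, if_neg (by omega)]
    · simp only [pvLoopA]
      rw [if_neg hs]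
      rw [List.drop_eq_nil_of_le (by omega : hay.length ≤ start)]
      simp [pvMB]

theorem pvA_spec (hay needle : List Int) :
    best_subsequence_match hay needle =
      (if 0 < (pvMB hay needle).1
        then (((pvMB hay needle).1 : Int), (pvMB hay needle).2.map (fun i : Nat => (i : Int)))
        else (0, none)) := by
  unfold best_subsequence_match
  by_cases hg : needle = [] ∨ hay = []
  · rw [if_pos hg]
    have h0 : (pvMB hay needle).1 = 0 := by
      rcases hg with h | h
      · have := pvMB_fst_le_right hay needle
        subst h; simpa using this
      · subst h; simp [pvMB]
    rw [h0]
    simp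
  · rw [if_neg hg]
    have := pvLoopA_eq hay needle (hay.length + 1) 0 0 none (by omega)
    simp only [List.drop_zero, Nat.cast_zero] at this
    rw [this]
    split <;> simp

-- B-side: the occurrence scan finds the first index whose suffix has lcp ≥ k
theorem occLoop_some (hay p : List Int) (k : Nat) :
    ∀ fuel i j, i ≤ j → j - i < fuel → j + k ≤ hay.length → (hay.drop j).take k = p →
      (∀ j', i ≤ j' → j' < j → ¬ (hay.drop j').take k = p) →
      pvOccLoop hay p k fuel i = some (j : Int) := by
  intro fuel
  induction fuel with
  | zero =>
    intro i j _ hf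
    omega
  | succ fuel ih =>
    intro i j hij hf hjk hC hmin
    rcases Nat.eq_or_lt_of_le hij with rfl | hlt
    · simp only [pvOccLoop]
      rw [if_pos (by omega), if_pos (by rw [PySem.List.slice_natCast_add]; exact hC)]
    · simp only [pvOccLoop]
      rw [if_pos (by omega)]
      rw [if_neg (by rw [PySem.List.slice_natCast_add]; exact hmin i le_rfl hlt)]
      exact ih (i + 1) j (by omega) (by omega) hjk hC (fun j' h1 h2 => hmin j' (by omega) h2)

theorem occLoop_sound (hay p : List Int) (k : Nat) :
    ∀ fuel i x, pvOccLoop hay p k fuel i = some x →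
      ∃ j : Nat, x = (j : Int) ∧ j + k ≤ hay.length ∧ (hay.drop j).take k = p := by
  intro fuel
  induction fuel with
  | zero =>
    intro i x h
    exact absurd h (by simp [pvOccLoop])
  | succ fuel ih =>
    intro i x h
    simp only [pvOccLoop] at h
    split at h
    · next hg =>
      split at h
      · next hC =>
        injection h with h; subst h
        exact ⟨i, rfl, by omega, by rw [PySem.List.slice_natCast_add] at hC; exact hC⟩
      · exact ih (i + 1) x h
    · exact absurd h (by simp)

theorem occLoop_none (hay p : List Int) (k : Nat) :
    ∀ fuel i,
      (∀ j, i ≤ j → j + k ≤ hay.length → ¬ (hay.drop j).take k = p) →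
      pvOccLoop hay p k fuel i = none := by
  intro fuel
  induction fuel with
  | zero =>
    intro i _
    rfl
  | succ fuel ih =>
    intro i hno
    simp only [pvOccLoop]
    split
    · next hg =>
      rw [if_neg (by rw [PySem.List.slice_natCast_add]; exact hno i le_rfl (by omega))]
      exact ih (i + 1) (fun j h1 h2 => hno j (by omega) h2)
    · rfl

theorem pvOcc_eq (hay needle : List Int) (k : Nat) :
    pvOcc hay needle k = pvOccLoop hay (needle.take k) k (hay.length + 1) 0 := by
  unfold pvOcc
  rw [PySem.List.slice_to_natCast]

theorem pvOcc_eq_some (hay needle : List Int) (k : Nat) (hk : k ≤ needle.length) (j : Nat)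
    (hj : k ≤ pvLcp (hay.drop j) needle)
    (hmin : ∀ j', j' < j → pvLcp (hay.drop j') needle < k) :
    pvOcc hay needle k = some (j : Int) := by
  have hlen : k ≤ hay.length - j := by
    have h1 := pvLcp_le_left (hay.drop j) needle
    simp only [List.length_drop] at h1
    omega
  have hjlen : j + k ≤ hay.length := by
    cases j with
    | zero => omega
    | succ j' => have hp := hmin 0 (by omega); omega
  rw [pvOcc_eq]
  refine occLoop_some hay (needle.take k) k (hay.length + 1) 0 j (by omega) (by omega) (by omega)
    ((pvLcp_take_iff _ _ _).mp hj).1 ?_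
  intro j' _ hj' hC
  have : k ≤ pvLcp (hay.drop j') needle := by
    refine (pvLcp_take_iff _ _ _).mpr ⟨hC, ?_, hk⟩
    simp only [List.length_drop]
    omega
  exact absurd this (by have := hmin j' hj'; omega)

theorem pvOcc_isSome_of (hay needle : List Int) (k j : Nat) (hk : k ≤ needle.length)
    (hj : k ≤ pvLcp (hay.drop j) needle) : (pvOcc hay needle k).isSome := by
  have hex : ∃ j, k ≤ pvLcp (hay.drop j) needle := ⟨j, hj⟩
  have hfind := Nat.find_spec hex
  have hmin : ∀ j', j' < Nat.find hex → pvLcp (hay.drop j') needle < k := by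
    intro j' hj'
    have := Nat.find_min hex hj'
    omega
  rw [pvOcc_eq_some hay needle k hk (Nat.find hex) hfind hmin]
  rfl

theorem pvOcc_sound (hay needle : List Int) (k : Nat) (x : Int) (hk : k ≤ needle.length)
    (h : pvOcc hay needle k = some x) :
    ∃ j : Nat, x = (j : Int) ∧ k ≤ pvLcp (hay.drop j) needle := by
  rw [pvOcc_eq] at h
  obtain ⟨j, rfl, hjk, hC⟩ := occLoop_sound hay (needle.take k) k (hay.length + 1) 0 x h
  refine ⟨j, rfl, (pvLcp_take_iff _ _ _).mpr ⟨hC, ?_, hk⟩⟩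
  simp only [List.length_drop]
  omega

theorem pvOcc_none_big (hay needle : List Int) (k : Nat)
    (h : needle.length < k ∨ hay.length < k) : pvOcc hay needle k = none := by
  by_cases hl : hay.length < k
  · rw [pvOcc_eq]
    simp only [pvOccLoop]
    rw [if_neg (by omega)]
  · have hn : needle.length < k := by omega
    rw [pvOcc_eq]
    refine occLoop_none hay (needle.take k) k (hay.length + 1) 0 ?_
    intro j _ hjk heq
    have h1 : ((hay.drop j).take k).length = k := by
      simp only [List.length_take, List.length_drop]
      omega
    have h2 : (needle.take k).length = needle.length := by
      simp only [List.length_take]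
      omega
    rw [heq, h2] at h1
    omega

theorem pvBsearch_spec (hay needle : List Int) :
    ∀ fuel lo hi, hi - lo ≤ fuel → lo ≤ hi → (pvOcc hay needle lo).isSome →
      pvOcc hay needle (hi + 1) = none →
      lo ≤ pvBsearch hay needle fuel lo hi ∧ pvBsearch hay needle fuel lo hi ≤ hi ∧
        (pvOcc hay needle (pvBsearch hay needle fuel lo hi)).isSome ∧
        pvOcc hay needle (pvBsearch hay needle fuel lo hi + 1) = none := by
  intro fuel
  induction fuel with
  | zero =>
    intro lo hi hf hle hsome hnone
    have : lo = hi := by omega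
    subst this
    exact ⟨le_rfl, le_rfl, hsome, hnone⟩
  | succ fuel ih =>
    intro lo hi hf hle hsome hnone
    by_cases hlt : lo < hi
    · simp only [pvBsearch]
      rw [if_pos hlt]
      by_cases hm : (pvOcc hay needle ((lo + hi + 1) / 2)).isSome
      · rw [if_pos hm]
        obtain ⟨a1, a2, a3, a4⟩ := ih ((lo + hi + 1) / 2) hi (by omega) (by omega) hm hnone
        exact ⟨by omega, a2, a3, a4⟩
      · rw [if_neg hm]
        have hmid1 : lo + 1 ≤ (lo + hi + 1) / 2 := by omega
        have hnone' : pvOcc hay needle ((lo + hi + 1) / 2 - 1 + 1) = none := by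
          have : (lo + hi + 1) / 2 - 1 + 1 = (lo + hi + 1) / 2 := by omega
          rw [this]
          exact Option.not_isSome_iff_eq_none.mp hm
        obtain ⟨a1, a2, a3, a4⟩ := ih lo ((lo + hi + 1) / 2 - 1) (by omega) (by omega) hsome hnone'
        exact ⟨a1, by omega, a3, a4⟩
    · have : lo = hi := by omega
      subst this
      simp only [pvBsearch]
      rw [if_neg (by omega)]
      exact ⟨le_rfl, le_rfl, hsome, hnone⟩

theorem pvB_spec (hay needle : List Int) :
    best_subsequence_match_alt hay needle =
      (if 0 < (pvMB hay needle).1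
        then (((pvMB hay needle).1 : Int), (pvMB hay needle).2.map (fun i : Nat => (i : Int)))
        else (0, none)) := by
  have h0 : (pvOcc hay needle 0).isSome := by
    rw [pvOcc_eq,
      occLoop_some hay (needle.take 0) 0 (hay.length + 1) 0 0 le_rfl (by omega) (by omega)
        (by simp) (fun j' _ hj' => absurd hj' (by omega))]
    rfl
  have hnone : pvOcc hay needle (min needle.length hay.length + 1) = none :=
    pvOcc_none_big hay needle _ (by omega)
  obtain ⟨hr1, hr2, hrsome, hrnone⟩ :=
    pvBsearch_spec hay needle (min needle.length hay.length + 1) 0 (min needle.length hay.length)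
      (by omega) (by omega) h0 hnone
  set r := pvBsearch hay needle (min needle.length hay.length + 1) 0 (min needle.length hay.length)
    with hrdef
  have hMn : (pvMB hay needle).1 ≤ needle.length := pvMB_fst_le_right hay needle
  have hrM : r = (pvMB hay needle).1 := by
    have hle : r ≤ (pvMB hay needle).1 := by
      obtain ⟨x, hx⟩ := Option.isSome_iff_exists.mp hrsome
      obtain ⟨j, -, hj⟩ := pvOcc_sound hay needle r x (by omega) hx
      exact le_trans hj (pvMB_le hay needle j)
    by_contra hcon
    have hlt : r < (pvMB hay needle).1 := by omega
    obtain ⟨i0, hi0⟩ := pvMB_pos_some hay needle (by omega)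
    obtain ⟨he, -, -⟩ := pvMB_snd_some hay needle i0 hi0
    have := pvOcc_isSome_of hay needle (r + 1) i0 (by omega) (by omega)
    rw [hrnone] at this
    simp at this
  simp only [best_subsequence_match_alt, ← hrdef, hrM]
  by_cases hM : (pvMB hay needle).1 = 0
  · rw [hM]
    simp
  · rw [if_neg hM, if_pos (by omega)]
    obtain ⟨i0, hi0⟩ := pvMB_pos_some hay needle (by omega)
    obtain ⟨he, -, hmin⟩ := pvMB_snd_some hay needle i0 hi0
    rw [pvOcc_eq_some hay needle (pvMB hay needle).1 hMn i0 (by omega)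
      (fun j' hj' => hmin j' hj'), hi0]
    simp

-- ===== VERDICT (by name: the statement is the Claim_ definition above) =====
theorem best_subsequence_match_spec : Claim_equal_best_subsequence_match := by
  intro hay needle _
  unfold Spec_best_subsequence_match
  rw [pvA_spec, pvB_spec]
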